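-- pv_equiv track=rewrite | github.com/Eythan31/paleographic-networks | SPARK-main-script-with-GUI.py | build_body_parts_per_letter_dictionary
-- ===== SOURCE A (Python) =====
-- def build_body_parts_per_letter_dictionary(l):
--     d={}
--     for i in range(1, len(l)):#skip first row
--         name = l[i][0]
--         full_feature = l[i][1]
--
--         if full_feature != "":
--             letter = full_feature[0]
--             body_part = get_full_body_part(full_feature)
--             terminal_feature = get_terminal_feature(full_feature)
--             if letter not in d:
--                 d[letter] = [body_part]
--             elif body_part not in d[letter]:
--                 d[letter].append(body_part)
--     return d
--
-- def get_terminal_feature(full_feature):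
--     if full_feature == "":
--         return ""
--     else:
--         return full_feature.split(":")[-1]
--
-- def get_full_body_part(full_feature):
--     if full_feature == "":
--         return ""
--     else:
--         splits = full_feature.split(":")
--         if(len(splits)==3):
--             return splits[1]
--         else:
--             return ':'.join(splits[1:-1])
-- ===== SOURCE B (Python) =====
-- def build_body_parts_per_letter_dictionary(l):
--     # One pass collecting every body part per letter (duplicates included),
--     # then a second pass deduplicating each list in first-appearance order.
--     groups = {}
--     for row in l[1:]:
--         full_feature = row[1]
--         if full_feature != "":
--             letter = full_feature[0]
--             groups[letter] = groups.get(letter, []) + [get_full_body_part(full_feature)]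
--     return {k: list(dict.fromkeys(v)) for k, v in groups.items()}
--
--
-- def get_full_body_part(full_feature):
--     if full_feature == "":
--         return ""
--     else:
--         splits = full_feature.split(":")
--         if(len(splits)==3):
--             return splits[1]
--         else:
--             return ':'.join(splits[1:-1])
-- ===== Notes on version B (the rewrite author's own statement) =====
-- stated objective: alternative
-- what changed: B drops the in-loop membership/append-if-absent logic: one pass accumulates every body part per letter with duplicates kept, and a separate final pass deduplicates each letter's list in first-appearance order with dict.fromkeys; the unused name and terminal_feature computations are omitted.
import Mathlib
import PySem

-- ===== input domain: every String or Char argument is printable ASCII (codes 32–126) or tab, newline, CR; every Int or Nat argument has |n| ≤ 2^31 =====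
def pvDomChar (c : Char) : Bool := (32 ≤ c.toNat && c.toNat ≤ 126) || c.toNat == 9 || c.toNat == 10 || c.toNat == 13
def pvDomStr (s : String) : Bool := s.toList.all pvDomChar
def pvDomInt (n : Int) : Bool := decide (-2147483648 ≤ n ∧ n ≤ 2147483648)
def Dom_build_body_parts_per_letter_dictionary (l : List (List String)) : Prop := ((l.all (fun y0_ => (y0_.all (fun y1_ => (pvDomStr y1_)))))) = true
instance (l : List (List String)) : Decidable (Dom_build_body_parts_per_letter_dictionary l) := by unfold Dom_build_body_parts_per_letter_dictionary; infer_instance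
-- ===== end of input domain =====

-- B accumulates every body part per letter in one pass (duplicates kept) and deduplicates each
-- list in a separate final pass, instead of A's append-if-absent check inside the loop.


-- ===== PORT A =====
-- shared helpers, ported from the same module (B keeps them unchanged);
-- split(":") never raises for a nonempty separator, so the `.getD []` default is unreachable
def get_terminal_feature (full_feature : String) : String :=
  if full_feature = "" then ""
  else PySem.List.pyGetD ((PySem.Str.split? full_feature ":").getD []) (-1) ""
    -- split(":")[-1]; the split list is never empty, so the "" default is unreachable

def get_full_body_part (full_feature : String) : String :=
  if full_feature = "" then ""
  else
    let splits := (PySem.Str.split? full_feature ":").getD []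
    if splits.length = 3 then PySem.List.pyGetD splits 1 ""
    else PySem.Str.join ":" (PySem.List.slice splits (some 1) (some (-1)))

-- full_feature[0]: the one-character string at index 0 (callers guard full_feature ≠ "",
-- so the "" branch where Python would raise IndexError is unreachable)
def pyFirstCharStr (s : String) : String :=
  match PySem.Str.pyGet? s 0 with
  | some c => String.ofList [c]
  | none => ""

-- loop body of A (one row of l)
def buildStepA (d : PySem.Dict String (List String)) (row : List String) : PySem.Dict String (List String) :=
  let _name := PySem.List.pyGetD row 0 ""
  let full_feature := PySem.List.pyGetD row 1 ""
  if full_feature ≠ "" then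
    let letter := pyFirstCharStr full_feature
    let body_part := get_full_body_part full_feature
    let _terminal_feature := get_terminal_feature full_feature
    if ¬ (d.contains letter = true) then d.insert letter [body_part]
    else if body_part ∉ d.getD letter [] then d.modify letter [] (fun v => v ++ [body_part])
    else d
  else d

def build_body_parts_per_letter_dictionary (l : List (List String)) : List (String × List String) :=
  ((PySem.List.pyRange 1 (PySem.List.len l) 1).foldl
    (fun d i => buildStepA d (PySem.List.pyGetD l i [])) PySem.Dict.empty).items

-- ===== PORT B =====
-- loop body of B (one row of l[1:])
def buildStepB (g : PySem.Dict String (List String)) (row : List String) : PySem.Dict String (List String) :=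
  let full_feature := PySem.List.pyGetD row 1 ""
  if full_feature ≠ "" then
    let letter := pyFirstCharStr full_feature
    g.insert letter (g.getD letter [] ++ [get_full_body_part full_feature])
  else g

def build_body_parts_per_letter_dictionary_alt (l : List (List String)) : List (String × List String) :=
  ((PySem.List.slice l (some 1) none).foldl buildStepB PySem.Dict.empty).items.map
    (fun kv => (kv.1, PySem.List.dedup kv.2))

-- ===== PRECONDITION & SPEC =====
-- Pre_ excludes exactly the inputs on which A raises IndexError: a row after the first with
-- fewer than two entries (A reads row[0] and row[1]; B raises there too, at row[1]).
def Pre_build_body_parts_per_letter_dictionary (l : List (List String)) : Prop :=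
  ∀ r ∈ l.drop 1, 2 ≤ r.length
instance (l : List (List String)) : Decidable (Pre_build_body_parts_per_letter_dictionary l) := by unfold Pre_build_body_parts_per_letter_dictionary; infer_instance

def pvWitness_build_body_parts_per_letter_dictionary : List (List String) :=
  [["name", "feature"], ["n1", "a:b:c"], ["n2", "a:b:c:d"], ["n3", ""]]

def Spec_build_body_parts_per_letter_dictionary (l : List (List String)) (out : List (String × List String)) : Prop := out = build_body_parts_per_letter_dictionary_alt l
instance (l : List (List String)) (out : List (String × List String)) : Decidable (Spec_build_body_parts_per_letter_dictionary l out) := by unfold Spec_build_body_parts_per_letter_dictionary; infer_instance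

-- ===== CLAIM (what is proved, stated in full; the proofs are below) =====
def Claim_equal_build_body_parts_per_letter_dictionary : Prop := ∀ (l : List (List String)), Dom_build_body_parts_per_letter_dictionary l → Pre_build_body_parts_per_letter_dictionary l → Spec_build_body_parts_per_letter_dictionary l (build_body_parts_per_letter_dictionary l)

-- ===== LEMMAS AND PROOFS =====

-- deduplicate every value of an items list / of a dict
def mapDedup (xs : List (String × List String)) : List (String × List String) :=
  xs.map (fun kv => (kv.1, PySem.List.dedup kv.2))

def dd (d : PySem.Dict String (List String)) : PySem.Dict String (List String) :=
  PySem.Dict.mk (mapDedup d.items)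

theorem contains_dd (d : PySem.Dict String (List String)) (k : String) :
    (dd d).contains k = d.contains k := by
  simp [dd, mapDedup, PySem.Dict.contains, List.any_map, Function.comp_def]

theorem keys_dd (d : PySem.Dict String (List String)) : (dd d).keys = d.keys := by
  simp [dd, mapDedup, PySem.Dict.keys, List.map_map, Function.comp_def]

theorem get?_dd (d : PySem.Dict String (List String)) (k : String) :
    (dd d).get? k = (d.get? k).map PySem.List.dedup := by
  simp [dd, mapDedup, PySem.Dict.get?, List.find?_map, Function.comp_def, PySem.List.dedup]

theorem getD_dd (d : PySem.Dict String (List String)) (k : String) :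
    (dd d).getD k [] = PySem.List.dedup (d.getD k []) := by
  rw [PySem.Dict.getD_eq_get?_getD, PySem.Dict.getD_eq_get?_getD, get?_dd]
  cases d.get? k <;> rfl

theorem dedup_append_singleton (v : List String) (x : String) :
    PySem.List.dedup (v ++ [x]) =
      if x ∈ v then PySem.List.dedup v else PySem.List.dedup v ++ [x] := by
  have h : PySem.List.dedup (v ++ [x]) = PySem.Set.add (PySem.Set.ofList v) x := by
    simp [PySem.List.dedup, PySem.Set.ofList, List.foldl_append]
  rw [h, PySem.Set.add]
  by_cases hm : x ∈ v
  · rw [if_pos, if_pos hm]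
    · rfl
    · have : x ∈ PySem.Set.ofList v := (PySem.Set.mem_ofList v x).mpr hm
      simpa [List.contains_iff_mem] using this
  · rw [if_neg, if_neg hm]
    · rfl
    · have : x ∉ PySem.Set.ofList v := fun h' => hm ((PySem.Set.mem_ofList v x).mp h')
      simpa [List.contains_iff_mem] using this

theorem insert_dd (d : PySem.Dict String (List String)) (k : String) (w : List String) :
    dd (d.insert k w) = (dd d).insert k (PySem.List.dedup w) := by
  apply PySem.Dict.ext
  show mapDedup (d.insert k w).items = ((dd d).insert k (PySem.List.dedup w)).items
  rw [PySem.Dict.items_insert, PySem.Dict.items_insert, contains_dd]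
  by_cases hc : d.contains k = true
  · rw [if_pos hc, if_pos hc]
    show mapDedup _ = List.map _ (mapDedup d.items)
    simp only [mapDedup, List.map_map]
    apply List.map_congr_left
    intro p _
    by_cases hpk : p.1 = k <;> simp [hpk]
  · rw [if_neg hc, if_neg hc]
    show mapDedup _ = mapDedup d.items ++ [(k, PySem.List.dedup w)]
    simp [mapDedup]

theorem insert_getD_self (d : PySem.Dict String (List String)) (k : String)
    (hnd : d.keys.Nodup) (hc : d.contains k = true) :
    d.insert k (d.getD k []) = d := by
  apply PySem.Dict.ext
  rw [PySem.Dict.items_insert, if_pos hc]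
  conv_rhs => rw [← List.map_id d.items]
  apply List.map_congr_left
  intro p hp
  by_cases hpk : (p.1 == k) = true
  · have hk : p.1 = k := by simpa using hpk
    have hgd : d.getD p.1 [] = p.2 := by
      rw [PySem.Dict.getD_eq_get?_getD, PySem.Dict.get?_of_mem_items d hp hnd]; rfl
    rw [if_pos hpk, ← hk, hgd]
    rfl
  · rw [if_neg hpk]
    rfl

theorem nodup_stepB (d : PySem.Dict String (List String)) (row : List String)
    (hnd : d.keys.Nodup) : (buildStepB d row).keys.Nodup := by
  unfold buildStepB
  by_cases hf : PySem.List.pyGetD row 1 "" ≠ ""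
  · simp only [if_pos hf]
    exact PySem.Dict.nodup_keys_insert _ _ _ hnd
  · simp only [if_neg hf]
    exact hnd

theorem step_comm (d : PySem.Dict String (List String)) (row : List String)
    (hnd : d.keys.Nodup) : buildStepA (dd d) row = dd (buildStepB d row) := by
  unfold buildStepA buildStepB
  by_cases hf : PySem.List.pyGetD row 1 "" ≠ ""
  · simp only [if_pos hf]
    set letter := pyFirstCharStr (PySem.List.pyGetD row 1 "") with hletter
    set bp := get_full_body_part (PySem.List.pyGetD row 1 "") with hbp
    set v := d.getD letter [] with hv
    rw [contains_dd]
    by_cases hc : d.contains letter = true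
    · rw [if_neg (by simp [hc]), getD_dd, ← hv]
      by_cases hm : bp ∈ v
      · rw [if_neg (by simp [hm]), insert_dd, dedup_append_singleton, if_pos hm,
            ← getD_dd]
        exact (insert_getD_self (dd d) letter (by rw [keys_dd]; exact hnd)
          (by rw [contains_dd]; exact hc)).symm
      · rw [if_pos (by simp [hm]), insert_dd, dedup_append_singleton, if_neg hm,
            PySem.Dict.modify, getD_dd, ← hv]
    · rw [if_pos (by simp [hc]), insert_dd]
      have hgd : v = [] := by
        rw [hv]; exact PySem.Dict.getD_of_not_contains d [] (by simpa using hc)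
      rw [hgd]
      rfl
  · simp only [if_neg hf]

theorem fold_comm (rows : List (List String)) (d : PySem.Dict String (List String))
    (hnd : d.keys.Nodup) :
    rows.foldl buildStepA (dd d) = dd (rows.foldl buildStepB d) := by
  induction rows generalizing d with
  | nil => simp
  | cons r rs ih =>
      simp only [List.foldl_cons]
      rw [step_comm d r hnd, ih _ (nodup_stepB d r hnd)]

-- ===== VERDICT (by name: the statement is the Claim_ definition above) =====
theorem build_body_parts_per_letter_dictionary_spec : Claim_equal_build_body_parts_per_letter_dictionary := by
  intro l _ _
  unfold Spec_build_body_parts_per_letter_dictionary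
  unfold build_body_parts_per_letter_dictionary build_body_parts_per_letter_dictionary_alt
  rw [PySem.List.foldl_pyRange_pyGetD l [] buildStepA PySem.Dict.empty (by norm_num : (0:Int) ≤ 1),
      PySem.List.slice_from_one]
  have h := fold_comm (l.drop 1) PySem.Dict.empty PySem.Dict.nodup_keys_empty
  have h0 : dd PySem.Dict.empty = PySem.Dict.empty := rfl
  rw [h0] at h
  rw [show ((1:Int).toNat = 1) from rfl, h]
  simp [dd, mapDedup, List.drop_one]
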